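-- pv_equiv track=rewrite | github.com/pypi-data/pypi-mirror-225 | packages/quantum-expresso-analize/quantum-expresso-analize-1.0.0.tar.gz/quantum-expresso-analize-1.0.0/pyqe/pyqe.py | find
-- ===== SOURCE A (Python) =====
-- def find(reg, linhas):
--     # cria a lista que vai ser retornada como resultado da funcao com a palavra e seu valor
--     busca_resultado = []
--     # for para varrer todas as linhas, o valor de i indica qual á linha em linhas[i]
--     for i in range(len(linhas)):
--         # for para varrer cada linha a procura da palavra buscada
--         for item in linhas[i]:
--             # verifica se o registro esta na linha
--             if item == reg:
--                 # este for e para varrer novamente a linha se achar o registro para gravar todos os valores da linha em uma lista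
--                 for item in linhas[i]:
--                     if item != reg:
--                         busca_resultado.append(item)
--     return busca_resultado
-- ===== SOURCE B (Python) =====
-- def find(reg, linhas):
--     busca_resultado = []
--     for linha in linhas:
--         c = 0
--         outros = []
--         for item in linha:
--             if item == reg:
--                 c += 1
--             else:
--                 outros.append(item)
--         busca_resultado.extend(outros * c)
--     return busca_resultado
-- ===== Notes on version B (the rewrite author's own statement) =====
-- stated objective: alternative
-- what changed: Single pass per line maintaining (count of reg, the other items) and then appending that list count times, instead of rescanning the whole line for every occurrence of reg.
import Mathlib
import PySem

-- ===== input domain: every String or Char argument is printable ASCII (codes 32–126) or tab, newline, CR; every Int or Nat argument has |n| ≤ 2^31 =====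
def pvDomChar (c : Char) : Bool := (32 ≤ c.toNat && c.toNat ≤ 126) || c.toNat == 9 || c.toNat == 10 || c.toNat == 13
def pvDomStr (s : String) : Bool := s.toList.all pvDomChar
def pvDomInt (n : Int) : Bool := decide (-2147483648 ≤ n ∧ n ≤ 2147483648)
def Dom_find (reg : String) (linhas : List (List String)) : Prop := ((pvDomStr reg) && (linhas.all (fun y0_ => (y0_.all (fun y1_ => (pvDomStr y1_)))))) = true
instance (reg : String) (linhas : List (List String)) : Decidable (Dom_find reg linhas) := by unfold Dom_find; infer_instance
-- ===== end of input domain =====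

-- B replaces A's rescans of the whole line on every occurrence of reg by one pass per line
-- (count reg, gather the other items once, append that list count times).

-- ===== PORT A =====
-- A: for each line, for each item equal to reg, rescan the line appending every item ≠ reg.
def find (reg : String) (linhas : List (List String)) : List String :=
  linhas.foldl (fun acc linha =>
    linha.foldl (fun acc1 item =>
      if item == reg then
        linha.foldl (fun acc2 it2 => if it2 != reg then acc2 ++ [it2] else acc2) acc1
      else acc1) acc) []

-- ===== PORT B =====
-- B: one pass per line maintaining (count of reg, other items); then extend by outros * c.
def find_alt (reg : String) (linhas : List (List String)) : List String :=
  linhas.foldl (fun acc linha =>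
    let p := linha.foldl (fun (st : Nat × List String) item =>
      if item == reg then (st.1 + 1, st.2) else (st.1, st.2 ++ [item])) (0, [])
    acc ++ (List.replicate p.1 p.2).flatten) []

-- ===== PRECONDITION & SPEC =====
def Spec_find (reg : String) (linhas : List (List String)) (out : List String) : Prop := out = find_alt reg linhas
instance (reg : String) (linhas : List (List String)) (out : List String) : Decidable (Spec_find reg linhas out) := by unfold Spec_find; infer_instance

-- ===== CLAIM (what is proved, stated in full; the proofs are below) =====
def Claim_equal_find : Prop := ∀ (reg : String) (linhas : List (List String)), Dom_find reg linhas → Spec_find reg linhas (find reg linhas)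

-- ===== LEMMAS AND PROOFS =====

-- A's innermost rescan appends exactly the items ≠ reg, in order.
theorem inner_rescan (reg : String) (l : List String) (acc : List String) :
    l.foldl (fun acc2 it2 => if it2 != reg then acc2 ++ [it2] else acc2) acc
      = acc ++ l.filter (fun it => it != reg) := by
  induction l generalizing acc with
  | nil => simp
  | cons x xs ih =>
    rw [List.foldl_cons, List.filter_cons]
    by_cases h : (x != reg) = true
    · rw [if_pos h, if_pos h, ih]; simp
    · rw [if_neg h, if_neg h, ih]

-- A fold that appends a fixed list O once per item equal to reg.
theorem middle_fold (reg : String) (O : List String) (l : List String) (acc : List String) :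
    l.foldl (fun acc1 item => if item == reg then acc1 ++ O else acc1) acc
      = acc ++ (List.replicate (l.count reg) O).flatten := by
  induction l generalizing acc with
  | nil => simp
  | cons x xs ih =>
    rw [List.foldl_cons, List.count_cons]
    by_cases h : (x == reg) = true
    · rw [if_pos h, ih]
      simp [beq_iff_eq.mp h, List.replicate_succ, List.append_assoc]
    · rw [if_neg h, ih]
      simp [(by simpa using h : ¬ x = reg)]

-- B's single pass computes (count of reg, items ≠ reg).
theorem b_pass (reg : String) (l : List String) (n : Nat) (s : List String) :
    l.foldl (fun (st : Nat × List String) item =>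
        if item == reg then (st.1 + 1, st.2) else (st.1, st.2 ++ [item])) (n, s)
      = (n + l.count reg, s ++ l.filter (fun it => it != reg)) := by
  induction l generalizing n s with
  | nil => simp
  | cons x xs ih =>
    rw [List.foldl_cons, List.count_cons, List.filter_cons]
    by_cases h : (x == reg) = true
    · rw [if_pos h, ih]
      have hx : x = reg := beq_iff_eq.mp h
      simp [hx]; omega
    · have hx : ¬ x = reg := by simpa using h
      rw [if_neg h, if_pos (bne_iff_ne.mpr hx), ih]
      simp [hx]

theorem per_line (reg : String) (linha : List String) (acc : List String) :
    linha.foldl (fun acc1 item =>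
      if item == reg then
        linha.foldl (fun acc2 it2 => if it2 != reg then acc2 ++ [it2] else acc2) acc1
      else acc1) acc
      = acc ++ (List.replicate ((linha.foldl (fun (st : Nat × List String) item =>
          if item == reg then (st.1 + 1, st.2) else (st.1, st.2 ++ [item])) (0, [])).1)
          ((linha.foldl (fun (st : Nat × List String) item =>
          if item == reg then (st.1 + 1, st.2) else (st.1, st.2 ++ [item])) (0, [])).2)).flatten := by
  have h1 : ∀ acc1 : List String,
      (fun acc1 item => if item == reg then
        linha.foldl (fun acc2 it2 => if it2 != reg then acc2 ++ [it2] else acc2) acc1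
        else acc1)
      = (fun acc1 item => if item == reg then acc1 ++ linha.filter (fun it => it != reg) else acc1) := by
    intro _; funext a i; rw [inner_rescan]
  rw [h1 acc, middle_fold, b_pass]
  simp

theorem folds_eq (reg : String) (linhas : List (List String)) (acc : List String) :
    linhas.foldl (fun acc linha =>
      linha.foldl (fun acc1 item =>
        if item == reg then
          linha.foldl (fun acc2 it2 => if it2 != reg then acc2 ++ [it2] else acc2) acc1
        else acc1) acc) acc
    = linhas.foldl (fun acc linha =>
        let p := linha.foldl (fun (st : Nat × List String) item =>
          if item == reg then (st.1 + 1, st.2) else (st.1, st.2 ++ [item])) (0, [])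
        acc ++ (List.replicate p.1 p.2).flatten) acc := by
  induction linhas generalizing acc with
  | nil => rfl
  | cons l ls ih => simp only [List.foldl_cons]; rw [per_line]; exact ih _

-- ===== VERDICT (by name: the statement is the Claim_ definition above) =====
theorem find_spec : Claim_equal_find := by
  intro reg linhas _
  show find reg linhas = find_alt reg linhas
  unfold find find_alt
  exact folds_eq reg linhas []
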